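-- pv_equiv track=rewrite | github.com/Muzaffarfsd/WEB4TG-BOT | src/prompt_composer.py | _prioritize_signals
-- ===== SOURCE A (Python) =====
-- from typing import Optional, List, Dict, Tuple
--
-- SIGNAL_PRIORITIES = {
--     "objection": 100,
--     "buying_signal": 95,
--     "funnel_stage": 90,
--     "bant": 85,
--     "propensity": 80,
--     "emotion": 75,
--     "decision_maker": 70,
--     "indecision": 70,
--     "risk_aversion": 65,
--     "competitor": 65,
--     "momentum": 60,
--     "negotiation_stance": 60,
--     "client_style": 55,
--     "budget": 55,
--     "question_density": 50,
--     "trust_velocity": 45,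
--     "micro_commitments": 45,
--     "winback": 40,
--     "fatigue": 40,
--     "diversity": 35,
--     "velocity": 30,
--     "sentiment": 30,
--     "upsell": 25,
--     "social_proof": 20,
--     "case_study": 20,
--     "proactive_value": 15,
--     "ab_test": 10,
--     "rag": 10,
--     "adaptive_instructions": 10,
--     "social_links": 5,
-- }
--
-- def _prioritize_signals(context_signals: Dict[str, str], max_signals: int = 7) -> List[Tuple[str, str]]:
--     scored = []
--     for signal_type, signal_text in context_signals.items():
--         priority = SIGNAL_PRIORITIES.get(signal_type, 10)
--         if signal_text and len(signal_text.strip()) > 5: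
--             scored.append((priority, signal_type, signal_text))
--
--     scored.sort(key=lambda x: x[0], reverse=True)
--     return [(s[1], s[2]) for s in scored[:max_signals]]
-- ===== SOURCE B (Python) =====
-- from typing import List, Dict, Tuple
--
-- SIGNAL_PRIORITIES = {
--     "objection": 100,
--     "buying_signal": 95,
--     "funnel_stage": 90,
--     "bant": 85,
--     "propensity": 80,
--     "emotion": 75,
--     "decision_maker": 70,
--     "indecision": 70,
--     "risk_aversion": 65,
--     "competitor": 65,
--     "momentum": 60,
--     "negotiation_stance": 60,
--     "client_style": 55,
--     "budget": 55,
--     "question_density": 50,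
--     "trust_velocity": 45,
--     "micro_commitments": 45,
--     "winback": 40,
--     "fatigue": 40,
--     "diversity": 35,
--     "velocity": 30,
--     "sentiment": 30,
--     "upsell": 25,
--     "social_proof": 20,
--     "case_study": 20,
--     "proactive_value": 15,
--     "ab_test": 10,
--     "rag": 10,
--     "adaptive_instructions": 10,
--     "social_links": 5,
-- }
--
-- def _prioritize_signals(context_signals: Dict[str, str], max_signals: int = 7) -> List[Tuple[str, str]]:
--     # Bucket the kept signals by priority (insertion order preserved inside each
--     # bucket), then concatenate the buckets in descending priority order.
--     buckets = {}
--     for signal_type, signal_text in context_signals.items():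
--         if signal_text and len(signal_text.strip()) > 5:
--             priority = SIGNAL_PRIORITIES.get(signal_type, 10)
--             buckets.setdefault(priority, []).append((signal_type, signal_text))
--     merged = []
--     for priority in sorted(buckets, reverse=True):
--         merged.extend(buckets[priority])
--     return merged[:max_signals]
-- ===== Notes on version B (the rewrite author's own statement) =====
-- stated objective: alternative
-- what changed: Replaces the scored-tuple list plus comparison sort with a single-pass grouping into priority buckets (dict of lists) that are concatenated in descending priority order, so no per-element tuples are built and only the distinct priorities are sorted.
import Mathlib
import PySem

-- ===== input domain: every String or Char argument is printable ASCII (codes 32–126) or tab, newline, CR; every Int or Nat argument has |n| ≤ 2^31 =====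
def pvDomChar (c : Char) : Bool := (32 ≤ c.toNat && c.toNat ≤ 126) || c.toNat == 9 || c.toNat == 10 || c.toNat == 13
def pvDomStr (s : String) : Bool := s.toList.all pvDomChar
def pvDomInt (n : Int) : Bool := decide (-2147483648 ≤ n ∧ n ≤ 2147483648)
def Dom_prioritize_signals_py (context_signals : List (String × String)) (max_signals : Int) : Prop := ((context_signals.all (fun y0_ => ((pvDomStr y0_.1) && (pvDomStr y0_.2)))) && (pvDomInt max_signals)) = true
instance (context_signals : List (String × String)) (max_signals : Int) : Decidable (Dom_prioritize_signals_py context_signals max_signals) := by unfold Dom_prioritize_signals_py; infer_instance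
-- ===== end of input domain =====

-- B replaces A's scored-tuple list + reverse comparison sort by one grouping pass into
-- priority buckets concatenated in descending priority order (objective: alternative).

-- Module-level constant SIGNAL_PRIORITIES, shared by A and B (as in the Python module).
def SIGNAL_PRIORITIES : PySem.Dict String Int := PySem.Dict.ofList
  [("objection", 100), ("buying_signal", 95), ("funnel_stage", 90), ("bant", 85),
   ("propensity", 80), ("emotion", 75), ("decision_maker", 70), ("indecision", 70),
   ("risk_aversion", 65), ("competitor", 65), ("momentum", 60), ("negotiation_stance", 60),
   ("client_style", 55), ("budget", 55), ("question_density", 50), ("trust_velocity", 45),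
   ("micro_commitments", 45), ("winback", 40), ("fatigue", 40), ("diversity", 35),
   ("velocity", 30), ("sentiment", 30), ("upsell", 25), ("social_proof", 20),
   ("case_study", 20), ("proactive_value", 15), ("ab_test", 10), ("rag", 10),
   ("adaptive_instructions", 10), ("social_links", 5)]

-- ===== PORT A =====
-- scored = []; for each (type, text): priority = table.get(type, 10); filter; append triple;
-- scored.sort(key=fst, reverse=True); return [(s[1], s[2]) for s in scored[:max_signals]].
def prioritize_signals_py (context_signals : List (String × String)) (max_signals : Int) : List (String × String) :=
  let scored : List (Int × String × String) :=
    context_signals.foldl (fun acc p =>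
      let priority := SIGNAL_PRIORITIES.getD p.1 10
      if p.2 ≠ "" ∧ 5 < PySem.Str.len (PySem.Str.strip p.2) then
        acc ++ [(priority, p.1, p.2)]
      else acc) []
  let sorted := PySem.List.sorted scored (fun x => x.1) true
  (PySem.List.slice sorted none (some max_signals)).map (fun s => (s.2.1, s.2.2))

-- ===== PORT B =====
-- buckets = {}; one pass: buckets.setdefault(priority, []).append((type, text));
-- merged = concat of buckets[p] for p in sorted(buckets, reverse=True); return merged[:max_signals].
def prioritize_signals_py_alt (context_signals : List (String × String)) (max_signals : Int) : List (String × String) :=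
  let buckets : PySem.Dict Int (List (String × String)) :=
    context_signals.foldl (fun d p =>
      if p.2 ≠ "" ∧ 5 < PySem.Str.len (PySem.Str.strip p.2) then
        d.modify (SIGNAL_PRIORITIES.getD p.1 10) [] (fun l => l ++ [(p.1, p.2)])
      else d) PySem.Dict.empty
  let merged :=
    (PySem.List.sorted buckets.keys (fun k => k) true).foldl
      (fun acc priority => acc ++ buckets.getD priority []) []
  PySem.List.slice merged none (some max_signals)

-- ===== PRECONDITION & SPEC =====
def Spec_prioritize_signals_py (context_signals : List (String × String)) (max_signals : Int) (out : List (String × String)) : Prop := out = prioritize_signals_py_alt context_signals max_signals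
instance (context_signals : List (String × String)) (max_signals : Int) (out : List (String × String)) : Decidable (Spec_prioritize_signals_py context_signals max_signals out) := by unfold Spec_prioritize_signals_py; infer_instance

-- ===== CLAIM (what is proved, stated in full; the proofs are below) =====
def Claim_equal_prioritize_signals_py : Prop := ∀ (context_signals : List (String × String)) (max_signals : Int), Dom_prioritize_signals_py context_signals max_signals → Spec_prioritize_signals_py context_signals max_signals (prioritize_signals_py context_signals max_signals)

-- ===== LEMMAS AND PROOFS =====

-- insertBy passes over a prefix it does not belong before
theorem pv_insertBy_skip {α : Type} (before : α → α → Bool) (x : α) (A B : List α)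
    (h : ∀ a ∈ A, before x a = false) :
    PySem.List.insertBy before x (A ++ B) = A ++ PySem.List.insertBy before x B := by
  induction A with
  | nil => simp
  | cons a t ih =>
      simp only [List.cons_append, PySem.List.insertBy, h a (by simp)]
      simp only [Bool.false_eq_true, if_false]
      rw [ih (fun a ha => h a (by simp [ha]))]

-- insertBy lands at the front of a suffix it belongs before
theorem pv_insertBy_front {α : Type} (before : α → α → Bool) (x : α) (B : List α)
    (h : ∀ b ∈ B, before x b = true) :
    PySem.List.insertBy before x B = x :: B := by
  cases B with
  | nil => rfl
  | cons b t => simp [PySem.List.insertBy, h b (by simp)]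

-- inserting x into the bucket concatenation appends it to its own bucket
theorem pv_core_step {β : Type} (ps : List Int) (hps : ps.Pairwise (fun a b => b < a))
    (pre : List (Int × β)) (x : Int × β) (hx : x.1 ∈ ps) :
    PySem.List.insertBy (fun a b => decide (b.1 < a.1)) x
        (ps.flatMap (fun k => pre.filter (fun y => y.1 == k)))
      = ps.flatMap (fun k => (pre ++ [x]).filter (fun y => y.1 == k)) := by
  induction ps with
  | nil => cases hx
  | cons k ks ih =>
      have hlt : ∀ b ∈ ks, b < k := fun b hb => (List.pairwise_cons.1 hps).1 b hb
      have hfil : ∀ (k' : Int), (pre ++ [x]).filter (fun y => y.1 == k')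
          = pre.filter (fun y => y.1 == k') ++ if x.1 == k' then [x] else [] := by
        intro k'; simp [List.filter_append, List.filter_cons]
      by_cases hxk : x.1 = k
      · -- x joins the head bucket, at its end
        have h1 : ∀ a ∈ pre.filter (fun y => (y : Int × β).1 == k),
            (fun a b => decide ((b : Int × β).1 < a.1)) x a = false := by
          intro a ha
          have := (List.mem_filter.1 ha).2
          have hak : a.1 = k := by simpa using this
          simp [hak, hxk]
        have h2 : ∀ b ∈ ks.flatMap (fun k => pre.filter (fun y => (y : Int × β).1 == k)),
            (fun a b => decide ((b : Int × β).1 < a.1)) x b = true := by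
          intro b hb
          obtain ⟨k', hk', hbf⟩ := List.mem_flatMap.1 hb
          have hbk : b.1 = k' := by simpa using (List.mem_filter.1 hbf).2
          simp [hbk, hxk]; exact hlt k' hk'
        have hks : ∀ k' ∈ ks, (pre ++ [x]).filter (fun y => (y : Int × β).1 == k')
            = pre.filter (fun y => y.1 == k') := by
          intro k' hk'
          have : x.1 ≠ k' := by
            intro h; exact absurd (hlt k' hk') (by simp [← h, hxk])
          simp [hfil, this]
        rw [List.flatMap_cons, pv_insertBy_skip _ _ _ _ h1,
            pv_insertBy_front _ _ _ h2, List.flatMap_cons, hfil k,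
            List.flatMap_congr (fun k' hk' => hks k' hk')]
        simp [hxk]
      · -- x belongs to a later bucket
        have hxks : x.1 ∈ ks := by cases hx with
          | head => exact absurd rfl hxk
          | tail _ h => exact h
        have h1 : ∀ a ∈ pre.filter (fun y => (y : Int × β).1 == k),
            (fun a b => decide ((b : Int × β).1 < a.1)) x a = false := by
          intro a ha
          have hak : a.1 = k := by simpa using (List.mem_filter.1 ha).2
          have : x.1 < k := hlt _ hxks
          simp [hak]; omega
        rw [List.flatMap_cons, pv_insertBy_skip _ _ _ _ h1,
            ih (hps.sublist (List.sublist_cons_self k ks)) hxks, List.flatMap_cons,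
            hfil k]
        have : x.1 ≠ k := hxk
        simp [this]

-- folding insertBy over S grows the bucket concatenation
theorem pv_core_fold {β : Type} (ps : List Int) (hps : ps.Pairwise (fun a b => b < a))
    (S : List (Int × β)) : ∀ (pre : List (Int × β)), (∀ x ∈ S, x.1 ∈ ps) →
    S.foldl (fun acc x => PySem.List.insertBy (fun a b => decide (b.1 < a.1)) x acc)
        (ps.flatMap (fun k => pre.filter (fun y => y.1 == k)))
      = ps.flatMap (fun k => (pre ++ S).filter (fun y => y.1 == k)) := by
  induction S with
  | nil => intro pre _; simp
  | cons x t ih =>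
      intro pre h
      rw [List.foldl_cons, pv_core_step ps hps pre x (h x (by simp)),
          ih (pre ++ [x]) (fun y hy => h y (by simp [hy]))]
      simp

-- Python's stable reverse sort by key IS the descending-priority bucket concatenation
theorem pv_sorted_rev_eq_flatMap {β : Type} (ps : List Int)
    (hps : ps.Pairwise (fun a b => b < a)) (S : List (Int × β))
    (h : ∀ x ∈ S, x.1 ∈ ps) :
    PySem.List.sorted S (fun x => x.1) true
      = ps.flatMap (fun k => S.filter (fun y => y.1 == k)) := by
  rw [PySem.List.sorted_rev_eq_foldl_insertBy]
  have h2 := pv_core_fold ps hps S [] h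
  have h0 : ps.flatMap (fun k => List.filter (fun y => y.1 == k) ([] : List (Int × β))) = [] := by
    simp
  rw [h0] at h2
  simpa using h2

-- slice [:m] commutes with map (the clamp only reads the length, which map preserves)
theorem pv_slice_map {α β : Type} (f : α → β) (xs : List α) (m : Int) :
    PySem.List.slice (xs.map f) none (some m) = (PySem.List.slice xs none (some m)).map f := by
  simp [PySem.List.slice, List.map_take]

-- the whole equivalence, assembled
theorem pv_main (cs : List (String × String)) (m : Int) :
    prioritize_signals_py cs m = prioritize_signals_py_alt cs m := by
  unfold prioritize_signals_py prioritize_signals_py_alt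
  simp only []
  -- shared pieces
  have hscored : cs.foldl (fun acc p =>
        if p.2 ≠ "" ∧ 5 < PySem.Str.len (PySem.Str.strip p.2) then
          acc ++ [(SIGNAL_PRIORITIES.getD p.1 10, p.1, p.2)]
        else acc) []
      = ((cs.filter (fun p => decide (p.2 ≠ "" ∧ 5 < PySem.Str.len (PySem.Str.strip p.2)))).map
          (fun p => (SIGNAL_PRIORITIES.getD p.1 10, p.1, p.2))) := by
    rw [PySem.List.foldl_append_ite (fun p => p.2 ≠ "" ∧ 5 < PySem.Str.len (PySem.Str.strip p.2))
        (fun p => (SIGNAL_PRIORITIES.getD p.1 10, p.1, p.2)) cs []]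
    simp
  set S := ((cs.filter (fun p => decide (p.2 ≠ "" ∧ 5 < PySem.Str.len (PySem.Str.strip p.2)))).map
      (fun p => (SIGNAL_PRIORITIES.getD p.1 10, p.1, p.2))) with hS
  have hbuckets : cs.foldl (fun d p =>
        if p.2 ≠ "" ∧ 5 < PySem.Str.len (PySem.Str.strip p.2) then
          d.modify (SIGNAL_PRIORITIES.getD p.1 10) [] (fun l => l ++ [(p.1, p.2)])
        else d) PySem.Dict.empty
      = S.foldl (fun d q => d.modify q.1 [] (fun l => l ++ [q.2])) PySem.Dict.empty := by
    have hrw := PySem.List.foldl_ite_eq_foldl_filter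
        (fun p : String × String => p.2 ≠ "" ∧ 5 < PySem.Str.len (PySem.Str.strip p.2))
        (fun (d : PySem.Dict Int (List (String × String))) p =>
          d.modify (SIGNAL_PRIORITIES.getD p.1 10) [] (fun l => l ++ [(p.1, p.2)])) cs
        PySem.Dict.empty
    rw [hrw, hS, List.foldl_map]
  rw [hscored, hbuckets]
  set B := S.foldl (fun d q => d.modify q.1 [] (fun l => l ++ [q.2])) PySem.Dict.empty with hB
  have hgetD : ∀ k, B.getD k [] = (S.filter (fun q => q.1 == k)).map (fun q => q.2) := by
    intro k
    rw [hB, PySem.Dict.getD_foldl_modify_append S PySem.Dict.empty k]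
    simp
  have hkeys : ∀ k, k ∈ B.keys ↔ k ∈ S.map (fun q => q.1) := by
    intro k
    rw [hB, PySem.Dict.keys_foldl_modify_key S (fun q => q.1)
        [] (fun d q => fun l => l ++ [q.2]) PySem.Dict.empty]
    rw [PySem.Set.mem_update]
    simp
  have hnodup : B.keys.Nodup := by
    rw [hB]
    exact PySem.Dict.nodup_keys_foldl_modify_key S (fun q => q.1) []
      (fun d q => fun l => l ++ [q.2]) PySem.Dict.empty (by simp)
  set ps := PySem.List.sorted B.keys (fun k => k) true with hps
  have hperm : ps.Perm B.keys := PySem.List.sorted_perm B.keys (fun k => k) true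
  have hpsnd : ps.Nodup := (hperm.nodup_iff).2 hnodup
  have hge : ps.Pairwise (fun a b => b ≤ a) := PySem.List.sorted_pairwise_rev B.keys (fun k => k)
  have hgt : ps.Pairwise (fun a b => b < a) := by
    have := hge.and hpsnd
    exact this.imp (fun h => lt_of_le_of_ne h.1 (Ne.symm h.2))
  have hmemS : ∀ x ∈ S, x.1 ∈ ps := by
    intro x hx
    have : x.1 ∈ B.keys := (hkeys x.1).2 (List.mem_map_of_mem hx)
    exact (hperm.mem_iff).2 this
  have hsorted := pv_sorted_rev_eq_flatMap ps hgt S hmemS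
  have hmerged : ps.foldl (fun acc k => acc ++ B.getD k []) []
      = (PySem.List.sorted S (fun x => x.1) true).map (fun q => q.2) := by
    rw [PySem.List.foldl_append_eq_flatMap (fun k => B.getD k []) ps []]
    rw [List.flatMap_congr (fun k _ => hgetD k)]
    rw [hsorted, List.map_flatMap]
    simp
  rw [hmerged, pv_slice_map]

-- ===== VERDICT (by name: the statement is the Claim_ definition above) =====
theorem prioritize_signals_py_spec : Claim_equal_prioritize_signals_py := by
  intro cs m _
  exact pv_main cs m
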